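-- pv_equiv track=rewrite | github.com/patryk03/adventofcode-solutions | day6/adwent2020_6.py | dictionaryTesting
-- ===== SOURCE A (Python) =====
-- def dictionaryTesting(x):
--     dict = {}
--     length = len(x)
--     result = 0
--     for i in x:
--         for m in i:
--             if m in dict:
--                 dict[m] +=1
--             else:
--                 dict[m] = 1
--     for n in dict.values():
--         if n == length:
--             result +=1
--     return result
-- ===== SOURCE B (Python) =====
-- def dictionaryTesting(x):
--     # Flatten all characters, sort them so equal characters form contiguous
--     # runs, then count the runs whose length equals len(x).
--     n = len(x)
--     chars = sorted(c for s in x for c in s)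
--     return _count_full_runs(chars, 0, n)
--
--
-- def _count_full_runs(chars, i, n):
--     if i >= len(chars):
--         return 0
--     j = i + 1
--     while j < len(chars) and chars[j] == chars[i]:
--         j += 1
--     return (1 if j - i == n else 0) + _count_full_runs(chars, j, n)
-- ===== Notes on version B (the rewrite author's own statement) =====
-- stated objective: alternative
-- what changed: Replaces A's character-frequency dict plus values scan with flattening all characters, sorting them, and counting maximal equal-character runs whose length equals len(x).
import Mathlib
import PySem

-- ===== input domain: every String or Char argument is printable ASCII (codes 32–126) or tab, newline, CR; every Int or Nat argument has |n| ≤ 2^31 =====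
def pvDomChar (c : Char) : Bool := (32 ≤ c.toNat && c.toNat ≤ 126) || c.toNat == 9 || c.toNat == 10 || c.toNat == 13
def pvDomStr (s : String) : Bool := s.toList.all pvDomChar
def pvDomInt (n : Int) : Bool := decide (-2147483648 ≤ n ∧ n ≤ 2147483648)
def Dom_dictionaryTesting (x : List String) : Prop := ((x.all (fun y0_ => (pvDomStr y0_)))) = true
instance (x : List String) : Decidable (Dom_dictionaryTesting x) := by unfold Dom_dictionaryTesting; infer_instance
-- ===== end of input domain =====

-- B replaces A's character-counting dict with flatten + sort + run-length scan
-- (alternative decomposition, same exact results).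

-- ===== PORT A =====
def dictionaryTesting (x : List String) : Int :=
  let d : PySem.Dict Char Int :=
    x.foldl (fun d i =>
      i.toList.foldl (fun d m =>
        if d.contains m then d.insert m (d.getD m 0 + 1) else d.insert m 1) d)
      PySem.Dict.empty
  let length : Int := x.length
  d.values.foldl (fun result n => if n = length then result + 1 else result) 0

-- ===== PORT B =====
-- helper: count maximal runs of equal chars whose length is exactly n
def countFullRuns (chars : List Char) (n : Int) : Int :=
  match chars with
  | [] => 0
  | c :: rest =>
      (if (1 + ((rest.takeWhile (· == c)).length : Int)) = n then 1 else 0)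
        + countFullRuns (rest.dropWhile (· == c)) n
termination_by chars.length
decreasing_by
  simp only [List.length_cons]
  exact Nat.lt_succ_of_le (List.length_dropWhile_le _ _)

def dictionaryTesting_alt (x : List String) : Int :=
  let n : Int := x.length
  let chars := PySem.List.sorted (x.flatMap String.toList) (fun c => c) false
  countFullRuns chars n

-- ===== PRECONDITION & SPEC =====
def Spec_dictionaryTesting (x : List String) (out : Int) : Prop := out = dictionaryTesting_alt x
instance (x : List String) (out : Int) : Decidable (Spec_dictionaryTesting x out) := by unfold Spec_dictionaryTesting; infer_instance

-- ===== CLAIM (what is proved, stated in full; the proofs are below) =====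
def Claim_equal_dictionaryTesting : Prop := ∀ (x : List String), Dom_dictionaryTesting x → Spec_dictionaryTesting x (dictionaryTesting x)

-- ===== LEMMAS AND PROOFS =====

-- two nodup lists with the same members have the same countP
lemma countP_eq_of_nodup_mem {α : Type} (p : α → Bool) {u v : List α}
    (hu : u.Nodup) (hv : v.Nodup) (h : ∀ a, a ∈ u ↔ a ∈ v) :
    u.countP p = v.countP p :=
  ((List.perm_ext_iff_of_nodup hu hv).2 h).countP_eq p

-- A's branch on containment is exactly the counter step
lemma stepA_eq (d : PySem.Dict Char Int) (m : Char) :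
    (if d.contains m then d.insert m (d.getD m 0 + 1) else d.insert m 1)
      = d.insert m (d.getD m 0 + 1) := by
  by_cases h : d.contains m = true
  · simp [h]
  · have h0 : d.getD m 0 = 0 :=
      PySem.Dict.getD_of_not_contains d 0 (by simpa using h)
    simp [h, h0]

-- A computes: number of distinct chars of ys whose total count in ys is len x
lemma dictA_characterization (x : List String) :
    dictionaryTesting x =
      (((PySem.Set.ofList (x.flatMap String.toList)).countP
        (fun k => decide (((x.flatMap String.toList).count k : Int) = (x.length : Int)))) : Int) := by
  unfold dictionaryTesting
  have hstep : x.foldl (fun d i =>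
      i.toList.foldl (fun d m =>
        if d.contains m then d.insert m (d.getD m 0 + 1) else d.insert m 1) d)
      (PySem.Dict.empty : PySem.Dict Char Int)
      = PySem.Dict.counter (x.flatMap String.toList) := by
    have h1 : ∀ (d : PySem.Dict Char Int) (i : String),
        i.toList.foldl (fun d m =>
          if d.contains m then d.insert m (d.getD m 0 + 1) else d.insert m 1) d
        = i.toList.foldl (fun d m => d.insert m (d.getD m 0 + 1)) d := by
      intro d i
      exact PySem.List.foldl_congr_mem _ _ _ _ (fun d m _ => stepA_eq d m)
    calc x.foldl (fun d i =>
          i.toList.foldl (fun d m =>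
            if d.contains m then d.insert m (d.getD m 0 + 1) else d.insert m 1) d)
          (PySem.Dict.empty : PySem.Dict Char Int)
        = x.foldl (fun d i => i.toList.foldl (fun d m => d.insert m (d.getD m 0 + 1)) d)
            (PySem.Dict.empty : PySem.Dict Char Int) :=
          PySem.List.foldl_congr_mem _ _ _ _ (fun d i _ => h1 d i)
      _ = (x.flatMap String.toList).foldl (fun d m => d.insert m (d.getD m 0 + 1))
            (PySem.Dict.empty : PySem.Dict Char Int) := by
            rw [List.flatMap_def, List.foldl_flatten, List.foldl_map]
      _ = PySem.Dict.counter (x.flatMap String.toList) :=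
            PySem.Dict.foldl_insert_getD_add_one_eq_counter _
  rw [hstep]
  rw [PySem.List.foldl_ite_add_one (p := fun n => n = (x.length : Int))]
  have hv : (PySem.Dict.counter (x.flatMap String.toList)).values
      = (PySem.Set.ofList (x.flatMap String.toList)).map
          (fun k => ((x.flatMap String.toList).count k : Int)) := by
    show ((PySem.Dict.counter (x.flatMap String.toList)).items).map (fun p => p.2) = _
    rw [PySem.Dict.items_counter]
    simp
  rw [hv, List.countP_map]
  simp only [zero_add, Nat.cast_inj]
  exact List.countP_congr (fun k _ => by simp [Function.comp])

-- after dropWhile (· == c) on a ≤-sorted list, c does not occur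
lemma not_mem_dropWhile_of_sorted {c : Char} {rest : List Char}
    (hs : (c :: rest).Pairwise (· ≤ ·)) :
    c ∉ rest.dropWhile (· == c) := by
  intro hc
  cases hr : rest.dropWhile (· == c) with
  | nil => simp [hr] at hc
  | cons d r' =>
    have hd : ¬ (d == c) = true := by
      have := List.head?_dropWhile_not (· == c) rest
      simpa [hr] using this
    have hdc : d ≠ c := by simpa using hd
    have hdrest : d ∈ rest := (List.dropWhile_sublist (· == c)).mem (by simp [hr])
    have hcd : c ≤ d := (List.pairwise_cons.1 hs).1 d hdrest
    have hp : (d :: r').Pairwise (fun a b : Char => a ≤ b) := by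
      have hsub : (d :: r').Sublist rest := by
        rw [← hr]; exact List.dropWhile_sublist _
      exact List.Pairwise.sublist hsub (List.pairwise_cons.1 hs).2
    rw [hr] at hc
    rcases List.mem_cons.1 hc with h | h
    · exact hdc h.symm
    · have hdc2 : d ≤ c := (List.pairwise_cons.1 hp).1 c h
      exact hdc (le_antisymm hdc2 hcd)

-- run-length scan on a sorted list counts distinct chars with full count
lemma countFullRuns_sorted (n : Int) (s : List Char) (hs : s.Pairwise (· ≤ ·)) :
    countFullRuns s n =
      ((PySem.Set.ofList s).countP (fun k => decide ((s.count k : Int) = n)) : Int) := by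
  match s with
  | [] => simp [countFullRuns, PySem.Set.ofList]
  | c :: rest =>
    set t := rest.takeWhile (· == c) with ht
    set r := rest.dropWhile (· == c) with hrr
    have hrest : t ++ r = rest := List.takeWhile_append_dropWhile
    have htc : ∀ a ∈ t, a = c := by
      intro a ha
      have := List.mem_takeWhile_imp ha
      simpa using this
    have hcr : c ∉ r := not_mem_dropWhile_of_sorted hs
    have hrp : r.Pairwise (fun a b : Char => a ≤ b) :=
      List.Pairwise.sublist ((List.dropWhile_sublist (· == c)).trans
        (List.sublist_cons_self c rest)) hs
    have IH := countFullRuns_sorted n r hrp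
    have hcount_c : (c :: rest).count c = t.length + 1 := by
      rw [← hrest, List.count_cons_self, List.count_append]
      have h1 : t.count c = t.length := List.count_eq_length.2 (fun b hb => (htc b hb).symm)
      have h2 : r.count c = 0 := List.count_eq_zero.2 hcr
      omega
    have hcount_ne : ∀ k, k ≠ c → (c :: rest).count k = r.count k := by
      intro k hk
      rw [← hrest, List.count_cons_of_ne (Ne.symm hk), List.count_append]
      have : t.count k = 0 := List.count_eq_zero.2 (fun hmem => hk (htc k hmem))
      omega
    have hmem : ∀ a, a ∈ PySem.Set.ofList (c :: rest) ↔ a ∈ (c :: PySem.Set.ofList r) := by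
      intro a
      rw [PySem.Set.mem_ofList]
      simp only [List.mem_cons, PySem.Set.mem_ofList]
      constructor
      · rintro (h | h)
        · exact Or.inl h
        · rw [← hrest] at h
          rcases List.mem_append.1 h with h | h
          · exact Or.inl (htc a h)
          · exact Or.inr h
      · rintro (h | h)
        · exact Or.inl h
        · refine Or.inr ?_
          rw [← hrest]; exact List.mem_append.2 (Or.inr h)
    have hnodup : (c :: PySem.Set.ofList r).Nodup := by
      refine List.nodup_cons.2 ⟨?_, PySem.Set.nodup_ofList r⟩
      rw [PySem.Set.mem_ofList]; exact hcr
    have hcountP : (PySem.Set.ofList (c :: rest)).countP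
          (fun k => decide (((c :: rest).count k : Int) = n))
        = (c :: PySem.Set.ofList r).countP
            (fun k => decide (((c :: rest).count k : Int) = n)) :=
      countP_eq_of_nodup_mem _ (PySem.Set.nodup_ofList _) hnodup hmem
    have hunf : countFullRuns (c :: rest) n
        = (if (1 + ((t.length : Nat) : Int)) = n then 1 else 0) + countFullRuns r n := by
      rw [countFullRuns]
    rw [hunf]
    rw [IH, hcountP, List.countP_cons]
    have hinner : (PySem.Set.ofList r).countP (fun k => decide (((c :: rest).count k : Int) = n))
        = (PySem.Set.ofList r).countP (fun k => decide ((r.count k : Int) = n)) := by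
      refine List.countP_congr ?_
      intro k hk
      have hkc : k ≠ c := by
        rintro rfl; exact hcr ((PySem.Set.mem_ofList r k).1 hk)
      rw [hcount_ne k hkc]
    rw [hinner]
    have hpc : (decide (((c :: rest).count c : Int) = n))
        = (decide ((1 + ((t.length : Nat) : Int)) = n)) := by
      rw [hcount_c]
      apply decide_eq_decide.2
      push_cast
      constructor <;> intro h <;> omega
    rw [hpc]
    by_cases h : (1 + ((t.length : Nat) : Int)) = n
    · simp only [h, decide_true]
      push_cast; ring
    · simp only [h, decide_false]
      push_cast; ring
termination_by s.length
decreasing_by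
  have h2 : (List.dropWhile (fun x => x == c) rest).length ≤ rest.length :=
    List.length_dropWhile_le _ _
  simp only [List.length_cons]; omega

-- ===== VERDICT (by name: the statement is the Claim_ definition above) =====
theorem dictionaryTesting_spec : Claim_equal_dictionaryTesting := by
  intro x _
  show dictionaryTesting x = dictionaryTesting_alt x
  rw [dictA_characterization]
  unfold dictionaryTesting_alt
  set ys := x.flatMap String.toList with hys
  set s := PySem.List.sorted ys (fun c => c) false with hsrt
  have hperm : s.Perm ys := PySem.List.sorted_perm ys (fun c => c) false
  have hpw : s.Pairwise (fun a b : Char => a ≤ b) := PySem.List.sorted_pairwise ys (fun c => c)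
  rw [show countFullRuns s (x.length : Int)
      = ((PySem.Set.ofList s).countP (fun k => decide ((s.count k : Int) = (x.length : Int))) : Int)
    from countFullRuns_sorted _ s hpw]
  congr 1
  have h1 : (PySem.Set.ofList s).countP (fun k => decide ((s.count k : Int) = (x.length : Int)))
      = (PySem.Set.ofList s).countP (fun k => decide ((ys.count k : Int) = (x.length : Int))) := by
    refine List.countP_congr ?_
    intro k _
    rw [hperm.count_eq]
  rw [h1]
  exact (countP_eq_of_nodup_mem _ (PySem.Set.nodup_ofList _) (PySem.Set.nodup_ofList _)
    (fun a => by rw [PySem.Set.mem_ofList, PySem.Set.mem_ofList, hperm.mem_iff])).symm
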